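-- pv_equiv track=rewrite | github.com/jjiwoning/Code_Test | Programmers/BagInput.py | solution
-- ===== SOURCE A (Python) =====
-- import itertools
--
-- def solution(n, k, t, arr):
--     answer = 0
--
--     for i in range(k, n + 1):
--         ls = list(itertools.combinations(arr, i))
--         for j in ls:
--             if sum(j) <= t:
--                 answer += 1
--
--     return answer
-- ===== SOURCE B (Python) =====
-- def solution(n, k, t, arr):
--     # single-pass subset accumulation: all (size, sum) pairs of subsets, then one filtered count
--     pairs = [(0, 0)]
--     for x in arr:
--         pairs = pairs + [(sz + 1, s + x) for sz, s in pairs]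
--     return sum(1 for sz, s in pairs if k <= sz <= n and s <= t)
-- ===== Notes on version B (the rewrite author's own statement) =====
-- stated objective: alternative
-- what changed: Replaces the per-size itertools.combinations enumeration with a single left-to-right pass that accumulates all (subset-size, subset-sum) pairs, followed by one filtered count.
import Mathlib
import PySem

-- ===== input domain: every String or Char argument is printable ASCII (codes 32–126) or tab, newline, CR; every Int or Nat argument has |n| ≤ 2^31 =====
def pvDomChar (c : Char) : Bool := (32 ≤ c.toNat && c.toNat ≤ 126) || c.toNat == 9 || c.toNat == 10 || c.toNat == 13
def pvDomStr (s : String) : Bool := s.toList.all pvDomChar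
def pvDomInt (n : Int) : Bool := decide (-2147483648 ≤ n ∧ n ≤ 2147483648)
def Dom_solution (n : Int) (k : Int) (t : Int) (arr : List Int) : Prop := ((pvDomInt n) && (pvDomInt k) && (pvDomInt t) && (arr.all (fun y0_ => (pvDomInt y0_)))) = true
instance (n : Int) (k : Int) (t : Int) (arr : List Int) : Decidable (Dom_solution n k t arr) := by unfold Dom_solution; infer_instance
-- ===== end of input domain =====

-- B replaces the per-size itertools.combinations enumeration by one left-to-right pass
-- accumulating all (subset-size, subset-sum) pairs, then a single filtered count (objective: alternative).

-- ===== PORT A =====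
-- itertools.combinations(arr, r) in itertools' order (lexicographic by index)
def combos : List Int → Nat → List (List Int)
  | _, 0 => [[]]
  | [], _ + 1 => []
  | x :: xs, r + 1 => ((combos xs r).map (x :: ·)) ++ combos xs (r + 1)

-- i.toNat is faithful: Pre_solution guarantees every i drawn from the range is ≥ 0
-- (Python raises ValueError on a negative r, and those inputs are outside Pre_solution)
def solution (n : Int) (k : Int) (t : Int) (arr : List Int) : Int :=
  (PySem.List.pyRange k (n + 1) 1).foldl
    (fun answer i =>
      (combos arr i.toNat).foldl (fun a j => if j.sum ≤ t then a + 1 else a) answer)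
    0

-- ===== PORT B =====
def solution_alt (n : Int) (k : Int) (t : Int) (arr : List Int) : Int :=
  let pairs := arr.foldl (fun ps x => ps ++ ps.map (fun p => (p.1 + 1, p.2 + x))) [((0 : Int), (0 : Int))]
  pairs.foldl (fun acc p => if k ≤ p.1 ∧ p.1 ≤ n ∧ p.2 ≤ t then acc + 1 else acc) 0

-- ===== PRECONDITION & SPEC =====
-- Pre_ excludes exactly the inputs where A raises ValueError: range(k, n+1) containing a negative i.
def Pre_solution (n : Int) (k : Int) (t : Int) (arr : List Int) : Prop := 0 ≤ k ∨ n < k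
instance (n : Int) (k : Int) (t : Int) (arr : List Int) : Decidable (Pre_solution n k t arr) := by unfold Pre_solution; infer_instance
def pvWitness_solution : Int × Int × Int × List Int := (2, 1, 3, [1, 2, 3])

def Spec_solution (n : Int) (k : Int) (t : Int) (arr : List Int) (out : Int) : Prop := out = solution_alt n k t arr
instance (n : Int) (k : Int) (t : Int) (arr : List Int) (out : Int) : Decidable (Spec_solution n k t arr out) := by unfold Spec_solution; infer_instance

-- ===== CLAIM (what is proved, stated in full; the proofs are below) =====
def Claim_equal_solution : Prop := ∀ (n : Int) (k : Int) (t : Int) (arr : List Int), Dom_solution n k t arr → Pre_solution n k t arr → Spec_solution n k t arr (solution n k t arr)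

-- ===== LEMMAS AND PROOFS =====

-- canonical list of (size, sum) pairs of all index-subsets of xs
def S : List Int → List (Int × Int)
  | [] => [(0, 0)]
  | x :: xs => S xs ++ (S xs).map (fun p => (p.1 + 1, p.2 + x))

lemma S_fst_nonneg : ∀ (xs : List Int), ∀ d ∈ S xs, 0 ≤ d.1 := by
  intro xs
  induction xs with
  | nil => intro d hd; simp [S] at hd; simp [hd]
  | cons x xs ih =>
    intro d hd
    simp only [S, List.mem_append, List.mem_map] at hd
    rcases hd with hd | ⟨p, hp, rfl⟩
    · exact ih d hd
    · have := ih p hp; simp; omega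

lemma countP_congr' {α : Type} (l : List α) (p q : α → Bool) (h : ∀ a ∈ l, p a = q a) :
    l.countP p = l.countP q :=
  List.countP_congr (fun a ha => by rw [h a ha])

lemma sum_map_add' {α : Type} (l : List α) (f g : α → Int) :
    (l.map (fun a => f a + g a)).sum = (l.map f).sum + (l.map g).sum := by
  induction l with
  | nil => simp
  | cons a l ih => simp [ih]; ring

-- the B fold, counted through S
lemma fold_countP (q : Int × Int → Bool) :
    ∀ (xs : List Int) (ps : List (Int × Int)),
      ((xs.foldl (fun ps x => ps ++ ps.map (fun p => (p.1 + 1, p.2 + x))) ps).countP q : Int)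
        = ((S xs).map (fun d => (ps.countP (fun p => q (p.1 + d.1, p.2 + d.2)) : Int))).sum := by
  intro xs
  induction xs with
  | nil =>
    intro ps
    simp [S]
  | cons x xs ih =>
    intro ps
    simp only [List.foldl_cons]
    rw [ih]
    have hmap : (S xs).map
          (fun d => (((ps ++ ps.map (fun p : Int × Int => (p.1 + 1, p.2 + x))).countP
              (fun p => q (p.1 + d.1, p.2 + d.2)) : Nat) : Int))
        = (S xs).map (fun d =>
            (ps.countP (fun p => q (p.1 + d.1, p.2 + d.2)) : Int)
              + (ps.countP (fun p => q (p.1 + (d.1 + 1), p.2 + (d.2 + x))) : Int)) := by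
      apply List.map_congr_left
      intro d _
      rw [List.countP_append, List.countP_map]
      push_cast
      congr 1
      apply congrArg
      apply countP_congr'
      intro a _
      show q (a.1 + 1 + d.1, a.2 + x + d.2) = q (a.1 + (d.1 + 1), a.2 + (d.2 + x))
      have h1 : a.1 + 1 + d.1 = a.1 + (d.1 + 1) := by ring
      have h2 : a.2 + x + d.2 = a.2 + (d.2 + x) := by ring
      rw [h1, h2]
    rw [hmap, sum_map_add']
    simp only [S, List.map_append, List.sum_append, List.map_map]
    rfl

-- A's combinations count, through S
lemma combos_countP :
    ∀ (xs : List Int) (b : Int → Bool) (r : Nat),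
      ((combos xs r).countP (fun l => b l.sum) : Int)
        = ((S xs).countP (fun d => decide (d.1 = (r : Int)) && b d.2) : Int) := by
  intro xs
  induction xs with
  | nil =>
    intro b r
    cases r with
    | zero => simp [combos, S]
    | succ r => simp [combos, S]
  | cons x xs ih =>
    intro b r
    cases r with
    | zero =>
      show ((combos (x :: xs) 0).countP (fun l => b l.sum) : Int) = _
      simp only [combos, S, List.countP_append, List.countP_map]
      have hz : (S xs).countP ((fun d : Int × Int => decide (d.1 = ((0 : Nat) : Int)) && b d.2) ∘ (fun p : Int × Int => (p.1 + 1, p.2 + x))) = 0 := by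
        rw [List.countP_eq_zero]
        intro p hp
        have := S_fst_nonneg xs p hp
        simp only [Function.comp]
        simp
        omega
      rw [hz]
      have h0 := ih b 0
      simp only [combos] at h0
      rw [Nat.add_zero]
      exact h0
    | succ r =>
      simp only [combos, S, List.countP_append, List.countP_map]
      push_cast
      have hA : ((combos xs r).countP ((fun l => b l.sum) ∘ (fun l => x :: l)) : Int)
          = ((S xs).countP (fun d => decide (d.1 = (r : Int)) && b (x + d.2)) : Int) := by
        have h := ih (fun v => b (x + v)) r
        rw [← h]
        have hfun : ((fun l : List Int => b l.sum) ∘ (fun l => x :: l)) = (fun l : List Int => b (x + l.sum)) := by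
          funext l
          simp [Function.comp, List.sum_cons]
        rw [hfun]
      have hB : ((S xs).countP ((fun d : Int × Int => decide (d.1 = ((r : Int) + 1)) && b d.2) ∘ (fun p : Int × Int => (p.1 + 1, p.2 + x))) : Int)
          = ((S xs).countP (fun d => decide (d.1 = (r : Int)) && b (x + d.2)) : Int) := by
        have hfun : ((fun d : Int × Int => decide (d.1 = ((r : Int) + 1)) && b d.2) ∘ (fun p : Int × Int => (p.1 + 1, p.2 + x)))
            = (fun d : Int × Int => decide (d.1 = (r : Int)) && b (x + d.2)) := by
          funext p
          simp only [Function.comp]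
          have h1 : (decide (p.1 + 1 = (r : Int) + 1)) = (decide (p.1 = (r : Int))) := by
            rw [decide_eq_decide]
            omega
          have h2 : b (p.2 + x) = b (x + p.2) := by rw [Int.add_comm]
          rw [h1, h2]
        rw [hfun]
      rw [hA]
      have h3 := ih b (r + 1)
      push_cast at h3
      rw [h3, hB]
      ring
  
-- 0/1-sum equals countP
lemma sum_ite_countP (q : Int × Int → Bool) (l : List (Int × Int)) :
    (l.map (fun d => if q d then (1 : Int) else 0)).sum = (l.countP q : Int) := by
  induction l with
  | nil => simp
  | cons a l ih =>
    by_cases h : q a = true <;> simp [h, ih] <;> ring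

-- peel the first point of an integer interval out of a count
lemma countP_interval_split (l : List (Int × Int)) (b : Int → Bool) (k u : Int) :
    l.countP (fun d => decide (k ≤ d.1) && decide (d.1 < u) && b d.2)
      = l.countP (fun d => decide (d.1 = k) && decide (k < u) && b d.2)
        + l.countP (fun d => decide (k < d.1) && decide (d.1 < u) && b d.2) := by
  induction l with
  | nil => simp
  | cons a l ih =>
    rw [List.countP_cons, List.countP_cons, List.countP_cons, ih]
    have hpt : (if (decide (k ≤ a.1) && decide (a.1 < u) && b a.2) = true then 1 else 0)
        = (if (decide (a.1 = k) && decide (k < u) && b a.2) = true then 1 else 0)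
          + (if (decide (k < a.1) && decide (a.1 < u) && b a.2) = true then 1 else 0) := by
      by_cases hb : b a.2
      · simp only [hb, Bool.and_true, ← Bool.decide_and, decide_eq_true_eq]
        split_ifs <;> omega
      · simp only [Bool.not_eq_true] at hb
        simp [hb]
    omega

-- sum over the integer range [k, k+m) of per-size counts = one interval count
lemma rangeSum (L : List (Int × Int)) (b : Int → Bool) :
    ∀ (m : Nat) (k : Int), 0 ≤ k →
      ((PySem.List.pyRange k (k + (m : Int)) 1).map
          (fun i => (L.countP (fun d => decide (d.1 = ((i.toNat : Nat) : Int)) && b d.2) : Int))).sum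
        = (L.countP (fun d => decide (k ≤ d.1) && decide (d.1 < k + (m : Int)) && b d.2) : Int) := by
  intro m
  induction m with
  | zero =>
    intro k hk
    rw [PySem.List.pyRange_one_eq_nil (by push_cast; omega)]
    have h0 : L.countP (fun d => decide (k ≤ d.1) && decide (d.1 < k + ((0 : Nat) : Int)) && b d.2) = 0 := by
      rw [List.countP_eq_zero]
      intro d _
      simp only [Bool.and_eq_true, decide_eq_true_eq]
      intro h
      exact absurd h.1.2 (by push_cast; omega)
    rw [h0]
    simp
  | succ m ih =>
    intro k hk
    rw [PySem.List.pyRange_one_cons (by push_cast; omega)]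
    simp only [List.map_cons, List.sum_cons]
    have harg : (((k.toNat : Nat) : Int)) = k := by omega
    have hrest : k + ((m + 1 : Nat) : Int) = (k + 1) + (m : Int) := by push_cast; ring
    rw [hrest, ih (k + 1) (by omega), harg]
    have hconv : L.countP (fun d => decide (k + 1 ≤ d.1) && decide (d.1 < k + 1 + (m : Int)) && b d.2)
        = L.countP (fun d => decide (k < d.1) && decide (d.1 < k + 1 + (m : Int)) && b d.2) := by
      apply countP_congr'
      intro d _
      have h1 : (decide (k + 1 ≤ d.1)) = (decide (k < d.1)) := by
        rw [decide_eq_decide]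
        omega
      rw [h1]
    rw [hconv, countP_interval_split L b k ((k + 1) + (m : Int))]
    have hfix : L.countP (fun d => decide (d.1 = k) && decide (k < k + 1 + (m : Int)) && b d.2)
        = L.countP (fun d => decide (d.1 = k) && b d.2) := by
      apply countP_congr'
      intro d _
      have : decide (k < k + 1 + (m : Int)) = true := by simp; omega
      rw [this]
      simp
    rw [hfix]
    push_cast
    ring

-- A's nested loop as a sum of per-size counts
lemma foldl_outer (t : Int) (arr : List Int) :
    ∀ (l : List Int) (a : Int),
      l.foldl (fun answer i => (combos arr i.toNat).foldl (fun a j => if j.sum ≤ t then a + 1 else a) answer) a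
        = a + (l.map (fun i => ((combos arr i.toNat).countP (fun j => decide (j.sum ≤ t)) : Int))).sum := by
  intro l
  induction l with
  | nil => intro a; simp
  | cons i l ih =>
    intro a
    simp only [List.foldl_cons, List.map_cons, List.sum_cons]
    rw [ih, PySem.List.foldl_ite_add_one]
    ring

-- ===== VERDICT (by name: the statement is the Claim_ definition above) =====
theorem solution_spec : Claim_equal_solution := by
  intro n k t arr _ hpre
  unfold Spec_solution solution solution_alt
  rw [PySem.List.foldl_ite_add_one]
  rw [foldl_outer]
  set q : Int × Int → Bool := fun p => decide (k ≤ p.1 ∧ p.1 ≤ n ∧ p.2 ≤ t) with hq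
  rw [fold_countP q arr [((0 : Int), (0 : Int))]]
  have hsingle : (S arr).map (fun d => (([((0 : Int), (0 : Int))].countP (fun p => q (p.1 + d.1, p.2 + d.2)) : Nat) : Int))
      = (S arr).map (fun d => if q d then (1 : Int) else 0) := by
    apply List.map_congr_left
    intro d _
    simp only [List.countP_cons, List.countP_nil]
    simp only [zero_add]
    by_cases h : q d = true <;> simp [h]
  rw [hsingle, sum_ite_countP]
  -- now reduce A's side
  have hmapc : (PySem.List.pyRange k (n + 1) 1).map
        (fun i => ((combos arr i.toNat).countP (fun j => decide (j.sum ≤ t)) : Int))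
      = (PySem.List.pyRange k (n + 1) 1).map
        (fun i => ((S arr).countP (fun d => decide (d.1 = ((i.toNat : Nat) : Int)) && decide (d.2 ≤ t)) : Int)) := by
    apply List.map_congr_left
    intro i _
    exact combos_countP arr (fun v => decide (v ≤ t)) i.toNat
  rw [hmapc]
  by_cases hkn : n < k
  · rw [PySem.List.pyRange_one_eq_nil (by omega)]
    have h0 : (S arr).countP q = 0 := by
      rw [List.countP_eq_zero]
      intro d _
      simp [hq]
      omega
    simp [h0]
  · have hk0 : 0 ≤ k := by rcases hpre with h | h; exact h; omega
    have hkn' : k ≤ n := by omega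
    have hm : n + 1 = k + (((n + 1 - k).toNat : Nat) : Int) := by omega
    rw [hm, rangeSum (S arr) (fun v => decide (v ≤ t)) (n + 1 - k).toNat k hk0]
    have : (S arr).countP (fun d => decide (k ≤ d.1) && decide (d.1 < k + (((n + 1 - k).toNat : Nat) : Int)) && decide (d.2 ≤ t))
        = (S arr).countP q := by
      apply countP_congr'
      intro d _
      rw [hq]
      simp only [← Bool.decide_and]
      rw [decide_eq_decide]
      omega
    rw [this]
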